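-- pv_equiv track=rewrite | github.com/donkersgoed/aws-blogs-twitter-feed | resources/functions/mastodon_poster/index.py | prepare_authors
-- ===== SOURCE A (Python) =====
-- def prepare_authors(authors):
--     authors_string = ""
--     number_of_authors = len(authors)
--     for index, author in enumerate(authors):
--         authors_string += author
--         if index < number_of_authors - 2:
--             authors_string += ", "
--         elif index == number_of_authors - 2:
--             authors_string += " and "
--     return authors_string
-- ===== SOURCE B (Python) =====
-- def prepare_authors(authors):
--     if not authors:
--         return ""
--     if len(authors) == 1:
--         return authors[0]
--     return ", ".join(authors[:-1]) + " and " + authors[-1]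
-- ===== Notes on version B (the rewrite author's own statement) =====
-- stated objective: idiomatic
-- what changed: Replaces the index-conditional accumulation loop with two guards plus ', '.join on authors[:-1] and an appended ' and ' + authors[-1].
import Mathlib
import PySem

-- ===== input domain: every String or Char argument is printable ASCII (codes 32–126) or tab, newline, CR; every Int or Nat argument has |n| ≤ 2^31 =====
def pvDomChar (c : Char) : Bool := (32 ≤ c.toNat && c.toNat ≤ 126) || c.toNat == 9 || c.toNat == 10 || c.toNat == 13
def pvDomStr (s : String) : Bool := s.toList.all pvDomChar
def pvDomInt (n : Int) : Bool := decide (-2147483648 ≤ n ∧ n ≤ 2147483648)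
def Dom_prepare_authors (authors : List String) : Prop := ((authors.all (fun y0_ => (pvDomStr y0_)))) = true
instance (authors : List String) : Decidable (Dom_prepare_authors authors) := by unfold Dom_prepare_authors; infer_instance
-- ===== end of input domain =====

-- B replaces A's per-index separator branching by two guards plus join of the
-- init and an appended last element (idiomatic decomposition; same cost).


-- ===== PORT A =====
-- 'for index, author in enumerate(authors): …' — fold over the enumerated list;
-- the two separator branches in source order (comparisons on Int, as in Python).
def prepare_authors (authors : List String) : String :=
  let number_of_authors : Int := authors.length
  (PySem.List.enumerate authors 0).foldl
    (fun authors_string p =>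
      let authors_string := authors_string ++ p.2
      if p.1 < number_of_authors - 2 then authors_string ++ ", "
      else if p.1 = number_of_authors - 2 then authors_string ++ " and "
      else authors_string) ""

-- ===== PORT B =====
-- B: '', sole author, or ", ".join(authors[:-1]) + " and " + authors[-1].
def prepare_authors_alt (authors : List String) : String :=
  match authors with
  | [] => ""
  | [a] => a
  | a :: b :: rest =>
      PySem.Str.join ", " (PySem.List.slice (a :: b :: rest) none (some (-1)))
        ++ " and " ++ (a :: b :: rest).getLast (by simp)

-- ===== PRECONDITION & SPEC =====
def Spec_prepare_authors (authors : List String) (out : String) : Prop := out = prepare_authors_alt authors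
instance (authors : List String) (out : String) : Decidable (Spec_prepare_authors authors out) := by unfold Spec_prepare_authors; infer_instance

-- ===== CLAIM (what is proved, stated in full; the proofs are below) =====
def Claim_equal_prepare_authors : Prop := ∀ (authors : List String), Dom_prepare_authors authors → Spec_prepare_authors authors (prepare_authors authors)

-- ===== LEMMAS AND PROOFS =====

-- Common recursive characterisation: name, then ", " before all but the last
-- two, " and " before the last when there are at least two.
def pvGlue : List String → String
  | [] => ""
  | [a] => a
  | [a, b] => a ++ " and " ++ b
  | a :: b :: c :: rest => a ++ ", " ++ pvGlue (b :: c :: rest)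

theorem prepareA_fold_eq_glue (n : Int) :
    ∀ (l : List String) (i : Int) (s : String), n = i + l.length →
    (PySem.List.enumerate l i).foldl
      (fun authors_string p =>
        let authors_string := authors_string ++ p.2
        if p.1 < n - 2 then authors_string ++ ", "
        else if p.1 = n - 2 then authors_string ++ " and "
        else authors_string) s = s ++ pvGlue l := by
  intro l
  induction l with
  | nil => intro i s _; simp [PySem.List.enumerate_nil, pvGlue]
  | cons a rest ih =>
    intro i s hn
    rw [PySem.List.enumerate_cons, List.foldl_cons]
    rw [ih (i + 1) _ (by simp at hn ⊢; omega)]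
    simp only
    match rest with
    | [] =>
      simp at hn
      rw [if_neg (by omega), if_neg (by omega)]
      simp [pvGlue]
    | [b] =>
      simp at hn
      rw [if_neg (by omega), if_pos (by omega)]
      simp [pvGlue, String.append_assoc]
    | b :: c :: rs =>
      simp at hn
      rw [if_pos (by omega)]
      simp [pvGlue, String.append_assoc]

theorem prepareB_eq_glue : ∀ (l : List String), prepare_authors_alt l = pvGlue l := by
  intro l
  match l with
  | [] => rfl
  | [a] => rfl
  | a :: b :: rest =>
    induction rest generalizing a b with
    | nil =>
      apply String.toList_injective
      simp [prepare_authors_alt, pvGlue, PySem.List.slice_to_neg_one,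
        PySem.Str.toList_join, PySem.Chars.join, List.intercalate]
    | cons c rs ih =>
      apply String.toList_injective
      have hb := ih b c
      apply_fun String.toList at hb
      simp only [prepare_authors_alt, pvGlue, PySem.List.slice_to_neg_one] at hb ⊢
      simp only [List.dropLast_cons_of_ne_nil (by simp : (b :: c :: rs) ≠ [])]
      simp only [List.getLast_cons (by simp : (b :: c :: rs) ≠ [])]
      simp [PySem.Str.toList_join, PySem.Chars.join, List.intercalate] at hb ⊢
      rw [← hb]

-- ===== VERDICT (by name: the statement is the Claim_ definition above) =====
theorem prepare_authors_spec : Claim_equal_prepare_authors := by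
  intro authors _
  unfold Spec_prepare_authors prepare_authors
  rw [prepareA_fold_eq_glue (authors.length : Int) authors 0 "" (by simp),
    prepareB_eq_glue]
  simp
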